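-- pv_equiv track=rewrite | github.com/sujun1972/stock-analysis | backend/app/api/error_handler.py | _is_database_error
-- ===== SOURCE A (Python) =====
-- def _is_database_error(error_msg: str) -> bool:
--     """
--     检测是否为数据库相关错误
--
--     Args:
--         error_msg: 错误消息
--
--     Returns:
--         True 如果是数据库错误
--     """
--     db_indicators = [
--         "column",
--         "table",
--         "database",
--         "sql",
--         "query",
--         "SELECT",
--         "INSERT",
--         "UPDATE",
--         "DELETE",
--         "FROM",
--         "WHERE",
--         "constraint",
--         "foreign key",
--         "primary key",
--         "index",
--         "LINE",
--         "HINT",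
--         "relation",
--         "schema",
--     ]
--     error_lower = error_msg.lower()
--     return any(indicator.lower() in error_lower for indicator in db_indicators)
-- ===== SOURCE B (Python) =====
-- _DB_INDICATORS = (
--     "column", "table", "database", "sql", "query", "SELECT", "INSERT",
--     "UPDATE", "DELETE", "FROM", "WHERE", "constraint", "foreign key",
--     "primary key", "index", "LINE", "HINT", "relation", "schema",
-- )
--
-- # Index the lowered indicators by their first character, so the scan only
-- # tests indicators that can possibly start at a given position.
-- _BY_FIRST: dict = {}
-- for _w in _DB_INDICATORS:
--     _p = _w.lower()
--     _BY_FIRST.setdefault(_p[0], []).append(_p)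
--
--
-- def _is_database_error(error_msg: str) -> bool:
--     """Single pass over the lowered message: at each position, test only
--     the indicators that start with that character."""
--     msg = error_msg.lower()
--     return any(
--         msg.startswith(p, i)
--         for i, ch in enumerate(msg)
--         for p in _BY_FIRST.get(ch, ())
--     )
-- ===== Notes on version B (the rewrite author's own statement) =====
-- stated objective: alternative
-- what changed: A does one full-message substring scan per indicator; B builds a dict grouping the lowered indicators by first character once, then does a single left-to-right pass over the lowered message, testing at each position only the indicators whose first character matches.
import Mathlib
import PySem

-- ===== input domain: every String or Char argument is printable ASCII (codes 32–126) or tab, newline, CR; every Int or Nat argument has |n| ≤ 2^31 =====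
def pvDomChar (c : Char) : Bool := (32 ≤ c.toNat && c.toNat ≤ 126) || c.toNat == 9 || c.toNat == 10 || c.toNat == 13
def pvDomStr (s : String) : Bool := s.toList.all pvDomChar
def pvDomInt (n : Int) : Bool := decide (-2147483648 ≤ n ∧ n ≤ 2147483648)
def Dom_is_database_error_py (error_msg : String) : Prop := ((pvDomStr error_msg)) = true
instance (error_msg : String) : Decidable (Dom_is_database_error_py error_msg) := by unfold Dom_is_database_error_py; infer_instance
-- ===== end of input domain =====

-- B replaces A's one-full-scan-per-indicator loop by a first-character index
-- (a dict built once) and a single left-to-right pass over the lowered message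
-- (alternative decomposition, same results).

-- ===== PORT A =====
def pvDbIndicators : List String :=
  ["column", "table", "database", "sql", "query", "SELECT", "INSERT",
   "UPDATE", "DELETE", "FROM", "WHERE", "constraint", "foreign key",
   "primary key", "index", "LINE", "HINT", "relation", "schema"]

def is_database_error_py (error_msg : String) : Bool :=
  let error_lower := PySem.Str.lower error_msg
  pvDbIndicators.any (fun indicator => PySem.Str.isIn (PySem.Str.lower indicator) error_lower)

-- ===== PORT B =====
-- _BY_FIRST: the lowered indicators grouped by their first character
-- (setdefault(..., []).append(p) = Dict.modify (first char) [] (· ++ [p]))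
def pvByFirst : PySem.Dict Char (List (List Char)) :=
  pvDbIndicators.foldl
    (fun d w =>
      let p := PySem.Chars.lower w.toList
      d.modify p.head! [] (· ++ [p]))
    PySem.Dict.empty

-- the generator: positions left to right; at each, test only the indexed patterns
def pvScanB : List Char → Bool
  | [] => false
  | c :: rest =>
      (PySem.Dict.getD pvByFirst c []).any (fun p => PySem.Chars.startswith (c :: rest) p)
        || pvScanB rest

def is_database_error_py_alt (error_msg : String) : Bool :=
  pvScanB (PySem.Chars.lower error_msg.toList)

-- ===== PRECONDITION & SPEC =====
def Spec_is_database_error_py (error_msg : String) (out : Bool) : Prop := out = is_database_error_py_alt error_msg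
instance (error_msg : String) (out : Bool) : Decidable (Spec_is_database_error_py error_msg out) := by unfold Spec_is_database_error_py; infer_instance

-- ===== CLAIM (what is proved, stated in full; the proofs are below) =====
def Claim_equal_is_database_error_py : Prop := ∀ (error_msg : String), Dom_is_database_error_py error_msg → Spec_is_database_error_py error_msg (is_database_error_py error_msg)

-- ===== LEMMAS AND PROOFS =====

-- the lowered patterns, as char lists
def pvPatterns : List (List Char) := pvDbIndicators.map (fun w => PySem.Chars.lower w.toList)

-- the first-character index looks up exactly the patterns starting with that char
lemma getD_pvByFirst (c : Char) :
    PySem.Dict.getD pvByFirst c [] = pvPatterns.filter (fun p => p.head! == c) := by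
  have h : pvByFirst =
      (pvPatterns.map (fun p => (p.head!, p))).foldl
        (fun d q => d.modify q.1 [] (· ++ [q.2])) PySem.Dict.empty := by
    simp [pvByFirst, pvPatterns, List.foldl_map]
  rw [h, PySem.Dict.getD_foldl_modify_append]
  simp [List.filter_map, List.map_map, Function.comp_def]

lemma pvPatterns_ne_nil : ∀ p ∈ pvPatterns, p ≠ [] := by decide

lemma pvScanB_true_iff (s : List Char) :
    pvScanB s = true ↔ ∃ p ∈ pvPatterns, p <:+: s := by
  induction s with
  | nil =>
      simp only [pvScanB]
      constructor
      · intro h; cases h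
      · rintro ⟨p, hp, hinf⟩
        exact absurd (List.eq_nil_of_infix_nil hinf) (pvPatterns_ne_nil p hp)
  | cons c rest ih =>
      simp only [pvScanB, Bool.or_eq_true, List.any_eq_true, ih, getD_pvByFirst,
        List.mem_filter, PySem.Chars.startswith_iff]
      constructor
      · rintro (⟨p, ⟨hp, _⟩, hpre⟩ | ⟨p, hp, hinf⟩)
        · exact ⟨p, hp, hpre.isInfix⟩
        · exact ⟨p, hp, hinf.trans (List.infix_cons_iff.mpr (Or.inr (List.infix_refl rest)))⟩
      · rintro ⟨p, hp, hinf⟩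
        rcases List.infix_cons_iff.mp hinf with hpre | hinf'
        · refine Or.inl ⟨p, ⟨hp, ?_⟩, hpre⟩
          obtain ⟨h, t, rfl⟩ : ∃ h t, p = h :: t := by
            cases p with
            | nil => exact absurd rfl (pvPatterns_ne_nil [] hp)
            | cons h t => exact ⟨h, t, rfl⟩
          have : h = c := by
            obtain ⟨t1, heq⟩ := hpre
            exact (List.cons_eq_cons.mp heq).1
          simp [this]
        · exact Or.inr ⟨p, hp, hinf'⟩

-- ===== VERDICT (by name: the statement is the Claim_ definition above) =====
theorem is_database_error_py_spec : Claim_equal_is_database_error_py := by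
  intro error_msg _
  unfold Spec_is_database_error_py is_database_error_py is_database_error_py_alt
  rw [Bool.eq_iff_iff, pvScanB_true_iff]
  simp only [List.any_eq_true, PySem.Str.isIn]
  constructor
  · rintro ⟨w, hw, hin⟩
    refine ⟨PySem.Chars.lower w.toList, List.mem_map_of_mem hw, ?_⟩
    · rw [← PySem.Chars.isIn_iff_infix]
      simpa [PySem.Str.lower] using hin
  · rintro ⟨p, hp, hinf⟩
    obtain ⟨w, hw, rfl⟩ := List.mem_map.mp hp
    exact ⟨w, hw, by simpa [PySem.Str.lower] using (PySem.Chars.isIn_iff_infix _ _).mpr hinf⟩
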